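-- pv_equiv track=rewrite | github.com/Uarlley/URI | 1257.py | posicao
-- ===== SOURCE A (Python) =====
-- def posicao(textos):
--     i=0
--     j=0
--     soma=0
--     alfabeto="ABCDEFGHIJKLMNOPQRSTUVWXYZ"
--     for i in range(0,len(textos)):
--         frase = textos[i]
--         for j in range(0,len(frase)):
--             char = frase[j]
--             soma += j + i + alfabeto.find(char)
--     return soma
-- ===== SOURCE B (Python) =====
-- def posicao(textos):
--     alfabeto = "ABCDEFGHIJKLMNOPQRSTUVWXYZ"
--     soma = 0
--     for i, frase in enumerate(textos):
--         L = len(frase)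
--         soma += L * (L - 1) // 2 + i * L + sum(alfabeto.find(c) for c in frase)
--     return soma
-- ===== Notes on version B (the rewrite author's own statement) =====
-- stated objective: alternative
-- what changed: Replaces A's nested index loops over range(len(...)) with a single enumerate pass that adds, per string, the closed-form triangular number L*(L-1)//2 plus i*L for the index contributions and one character sum of alfabeto.find(c).
import Mathlib
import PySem

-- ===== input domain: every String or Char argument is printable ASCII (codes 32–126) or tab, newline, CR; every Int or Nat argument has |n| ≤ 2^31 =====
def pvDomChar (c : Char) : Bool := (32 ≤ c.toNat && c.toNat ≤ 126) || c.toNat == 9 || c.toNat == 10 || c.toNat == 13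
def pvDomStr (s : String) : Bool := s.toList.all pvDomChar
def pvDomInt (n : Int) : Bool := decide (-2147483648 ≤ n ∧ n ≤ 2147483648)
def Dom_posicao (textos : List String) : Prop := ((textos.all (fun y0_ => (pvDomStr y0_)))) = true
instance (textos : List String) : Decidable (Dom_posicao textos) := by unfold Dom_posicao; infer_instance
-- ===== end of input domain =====

-- B replaces A's nested index loops by one enumerate pass that adds, per string, the closed-form
-- triangular index sum L*(L-1)//2 plus i*L plus a single character sum of alfabeto.find(c) (alternative decomposition).


-- ===== PORT A =====
def posicao (textos : List String) : Int :=
  let soma : Int := 0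
  let alfabeto := "ABCDEFGHIJKLMNOPQRSTUVWXYZ"
  (PySem.List.pyRange 0 (textos.length : Int) 1).foldl
    (fun soma i =>
      let frase := PySem.List.pyGetD textos i ""
      (PySem.List.pyRange 0 (PySem.Str.len frase) 1).foldl
        (fun soma j =>
          let char := PySem.List.pyGetD frase.toList j ' '   -- frase[j], j always in range
          soma + (j + i + PySem.Str.find alfabeto (String.ofList [char]))) soma) soma

-- ===== PORT B =====
def posicao_alt (textos : List String) : Int :=
  let alfabeto := "ABCDEFGHIJKLMNOPQRSTUVWXYZ"
  (PySem.List.enumerate textos 0).foldl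
    (fun soma p =>
      let L := PySem.Str.len p.2
      soma + (PySem.Int.floordiv (L * (L - 1)) 2 + p.1 * L
        + (p.2.toList.map (fun c => PySem.Str.find alfabeto (String.ofList [c]))).sum)) 0

-- ===== PRECONDITION & SPEC =====
def Spec_posicao (textos : List String) (out : Int) : Prop := out = posicao_alt textos
instance (textos : List String) (out : Int) : Decidable (Spec_posicao textos out) := by unfold Spec_posicao; infer_instance

-- ===== CLAIM (what is proved, stated in full; the proofs are below) =====
def Claim_equal_posicao : Prop := ∀ (textos : List String), Dom_posicao textos → Spec_posicao textos (posicao textos)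

-- ===== LEMMAS AND PROOFS =====

-- per-character contribution (alfabeto.find of the one-char string)
def pvF (c : Char) : Int := PySem.Str.find "ABCDEFGHIJKLMNOPQRSTUVWXYZ" (String.ofList [c])

-- per-string contribution C i frase, exactly as B computes it
def pvC (i : Int) (frase : String) : Int :=
  PySem.Int.floordiv (PySem.Str.len frase * (PySem.Str.len frase - 1)) 2
    + i * PySem.Str.len frase
    + (frase.toList.map pvF).sum

lemma sum_range_tri (n : ℕ) : (List.range n).sum = n * (n - 1) / 2 := by
  induction n with
  | zero => simp
  | succ m ih =>
    rw [List.range_succ]; simp [ih]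
    have h : (m + 1) * m = m * (m - 1) + m * 2 := by
      cases m with
      | zero => simp
      | succ k => simp; ring
    rw [h, Nat.add_mul_div_right _ _ (by norm_num)]

-- ℤ-cast of the triangular number equals B's floordiv expression
lemma tri_cast (n : ℕ) :
    PySem.Int.floordiv ((n : Int) * ((n : Int) - 1)) 2 = ((n * (n - 1) / 2 : ℕ) : Int) := by
  have h : (n : Int) * ((n : Int) - 1) = ((n * (n - 1) : ℕ) : Int) := by
    cases n with
    | zero => simp
    | succ k => push_cast [Nat.add_sub_cancel]; ring
  rw [h]
  exact_mod_cast PySem.Int.floordiv_natCast (n * (n - 1)) 2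

-- A's inner loop over range(len(frase)) computes exactly the closed-form contribution pvC
lemma inner_loop (cs : List Char) (i s0 : Int) :
    (PySem.List.pyRange 0 (cs.length : Int) 1).foldl
      (fun s j => s + (j + i + pvF (PySem.List.pyGetD cs j ' '))) s0
    = s0 + (PySem.Int.floordiv ((cs.length : Int) * ((cs.length : Int) - 1)) 2
        + i * (cs.length : Int) + (cs.map pvF).sum) := by
  rw [PySem.List.foldl_add]
  have h1 : (PySem.List.pyRange 0 (cs.length : Int) 1).map
      (fun j => j + i + pvF (PySem.List.pyGetD cs j ' '))
      = (PySem.List.pyRange 0 (cs.length : Int) 1).map (fun j => (j + i) +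
          (fun j => pvF (PySem.List.pyGetD cs j ' ')) j) := rfl
  rw [h1, PySem.List.sum_map_add_int, PySem.List.sum_map_add_int]
  have h2 : (PySem.List.pyRange 0 (cs.length : Int) 1).map
      (fun j => pvF (PySem.List.pyGetD cs j ' ')) = cs.map pvF := by
    have hc : (fun j => pvF (PySem.List.pyGetD cs j ' '))
        = pvF ∘ (fun j => PySem.List.pyGetD cs j ' ') := rfl
    rw [hc, ← List.map_map,
      show (cs.length : Int) = PySem.List.len cs from by simp [PySem.List.len],
      PySem.List.map_pyGetD_pyRange_zero cs ' ']
  rw [h2]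
  have h3 : ((PySem.List.pyRange 0 (cs.length : Int) 1).map (fun j => j)).sum
      = PySem.Int.floordiv ((cs.length : Int) * ((cs.length : Int) - 1)) 2 := by
    rw [tri_cast, List.map_id', PySem.List.pyRange_one]
    simp [← Nat.cast_list_sum, sum_range_tri]
  have h4 : ((PySem.List.pyRange 0 (cs.length : Int) 1).map (fun _ => i)).sum
      = i * (cs.length : Int) := by
    rw [PySem.List.sum_map_const_int]
    simp [PySem.List.length_pyRange_one, mul_comm]
  rw [h3, h4]

-- index loop over range with getD = fold over enumerate (generalised over a prefix already consumed)
lemma range_eq_enumerate (C : Int → String → Int) :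
    ∀ (ts pre : List String) (s0 : Int),
    (PySem.List.pyRange (pre.length : Int) ((pre.length : Int) + ts.length) 1).foldl
      (fun s i => s + C i (PySem.List.pyGetD (pre ++ ts) i "")) s0
    = (PySem.List.enumerate ts (pre.length : Int)).foldl (fun s p => s + C p.1 p.2) s0 := by
  intro ts
  induction ts with
  | nil =>
    intro pre s0
    rw [PySem.List.pyRange_one_eq_nil (by simp)]
    simp [PySem.List.enumerate]
  | cons t ts ih =>
    intro pre s0
    rw [PySem.List.pyRange_one_cons (by simp only [List.length_cons]; omega), PySem.List.enumerate_cons]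
    simp only [List.foldl_cons]
    have hget : PySem.List.pyGetD (pre ++ t :: ts) (pre.length : Int) "" = t := by
      simp [PySem.List.pyGetD_natCast]
    rw [hget]
    have harr : pre ++ t :: ts = (pre ++ [t]) ++ ts := by simp
    have hlen : (pre.length : Int) + 1 = ((pre ++ [t]).length : Int) := by simp
    have hlen2 : (pre.length : Int) + ((t :: ts).length : Int)
        = ((pre ++ [t]).length : Int) + (ts.length : Int) := by simp; ring
    rw [harr, hlen2, hlen, ih (pre ++ [t])]

-- ===== VERDICT (by name: the statement is the Claim_ definition above) =====
theorem posicao_spec : Claim_equal_posicao := by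
  intro textos _
  unfold Spec_posicao posicao posicao_alt
  simp only []
  have hbody : (fun (soma : Int) (i : Int) =>
      (PySem.List.pyRange 0 (PySem.Str.len (PySem.List.pyGetD textos i "")) 1).foldl
        (fun soma j =>
          soma + (j + i + PySem.Str.find "ABCDEFGHIJKLMNOPQRSTUVWXYZ"
            (String.ofList [PySem.List.pyGetD (PySem.List.pyGetD textos i "").toList j ' ']))) soma)
      = (fun (s : Int) (i : Int) => s + pvC i (PySem.List.pyGetD textos i "")) := by
    funext s i
    have hlen : PySem.Str.len (PySem.List.pyGetD textos i "")
        = ((PySem.List.pyGetD textos i "").toList.length : Int) := by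
      simp [PySem.Str.len_eq]
    rw [hlen]
    exact inner_loop (PySem.List.pyGetD textos i "").toList i s
  rw [hbody]
  have key := range_eq_enumerate pvC textos [] 0
  simp only [List.nil_append, List.length_nil, Nat.cast_zero, zero_add] at key
  rw [key]
  rfl
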